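-- pv_equiv track=rewrite | github.com/AnsgarKlein/game-demo | parse.py | lex_number
-- ===== SOURCE A (Python) =====
-- JSON_NUMBER_CHARS = [ str(d) for d in range(0, 10) ]
--
-- def lex_number(inputstr):
--     json_number = ''
--
--     # If first c is a number keep adding all following numbers
--     for c in inputstr:
--         if c in JSON_NUMBER_CHARS:
--             json_number += c
--         else:
--             break
--
--     # If we did not find any number characters
--     if not len(json_number):
--         return None, inputstr
--
--     # Remove number characters from input
--     rest = inputstr[len(json_number):]
--
--     # Return number either as float or as int
--     if '.' in json_number:
--         return float(json_number), rest
--     else: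
--         return int(json_number), rest
--
--     return None, inputstr
-- ===== SOURCE B (Python) =====
-- def lex_number(inputstr):
--     # Stage 1: boundary index of the leading digit run (no accumulation).
--     k = 0
--     while k < len(inputstr) and '0' <= inputstr[k] <= '9':
--         k += 1
--     if k == 0:
--         return None, inputstr
--     # Stage 2: the value as an explicit positional sum, digit * 10**place.
--     value = sum((ord(inputstr[i]) - 48) * 10 ** (k - 1 - i) for i in range(k))
--     return value, inputstr[k:]
-- ===== Notes on version B (the rewrite author's own statement) =====
-- stated objective: alternative
-- what changed: Instead of accumulating a prefix string and calling int() (with a dead float/'.' branch), B first computes only the boundary index of the digit run, then computes the value as an explicit positional sum of ord(c)-48 times powers of ten.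
import Mathlib
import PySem

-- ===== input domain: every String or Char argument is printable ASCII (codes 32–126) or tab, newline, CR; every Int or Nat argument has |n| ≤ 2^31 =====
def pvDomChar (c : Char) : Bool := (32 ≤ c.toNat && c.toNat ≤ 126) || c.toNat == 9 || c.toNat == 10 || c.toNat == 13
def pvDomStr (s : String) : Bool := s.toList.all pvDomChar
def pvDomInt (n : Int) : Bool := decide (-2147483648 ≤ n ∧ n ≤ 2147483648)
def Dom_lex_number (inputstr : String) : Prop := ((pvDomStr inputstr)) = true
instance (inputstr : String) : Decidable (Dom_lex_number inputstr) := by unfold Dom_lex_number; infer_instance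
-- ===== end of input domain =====

-- B replaces A's accumulate-prefix-then-int() loop (and its dead float/'.' branch) by two
-- staged passes: a boundary-index scan, then an explicit positional sum digit*10^place.

-- ===== PORT A =====
-- JSON_NUMBER_CHARS = [str(d) for d in range(0, 10)]
def jsonNumberChars : List Char := ['0','1','2','3','4','5','6','7','8','9']

-- the for-loop with break, accumulating json_number
def lexNumGo : List Char → List Char → List Char
  | [], acc => acc
  | c :: rest, acc => if c ∈ jsonNumberChars then lexNumGo rest (acc ++ [c]) else acc

-- int(json_number): ported by hand as the standard left-to-right decimal fold; exact on
-- json_number's only possible shape here, a nonempty string of ASCII digits '0'-'9'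
def pyIntOfDigits (ds : List Char) : Int :=
  ds.foldl (fun a c => 10 * a + ((c.toNat : Int) - 48)) 0

def lex_number (inputstr : String) : Option Int × String :=
  let json_number := lexNumGo inputstr.toList []
  if json_number.length = 0 then (none, inputstr)
  else
    let rest := PySem.Str.slice inputstr (some (json_number.length : Int)) none
    if '.' ∈ json_number then
      -- unreachable branch: json_number holds only chars of JSON_NUMBER_CHARS, never '.';
      -- Python would return a float here, which has no port
      (none, rest)
    else
      (some (pyIntOfDigits json_number), rest)

-- ===== PORT B =====
-- Stage 1: the while-loop advancing k over the leading digit run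
def lexAltBoundary : List Char → Nat
  | [] => 0
  | c :: rest => if '0' ≤ c ∧ c ≤ '9' then lexAltBoundary rest + 1 else 0

def lex_number_alt (inputstr : String) : Option Int × String :=
  let cs := inputstr.toList
  let k := lexAltBoundary cs
  if k = 0 then (none, inputstr)
  else
    -- Stage 2: sum((ord(inputstr[i]) - 48) * 10 ** (k - 1 - i) for i in range(k));
    -- i < k ≤ len so inputstr[i] is cs[i]?, the getD default is never used
    let value : Int :=
      ((List.range k).map (fun i => (((cs[i]?.getD ' ').toNat : Int) - 48) * 10 ^ (k - 1 - i))).sum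
    (some value, PySem.Str.slice inputstr (some (k : Int)) none)

-- ===== PRECONDITION & SPEC =====
def Spec_lex_number (inputstr : String) (out : Option Int × String) : Prop := out = lex_number_alt inputstr
instance (inputstr : String) (out : Option Int × String) : Decidable (Spec_lex_number inputstr out) := by unfold Spec_lex_number; infer_instance

-- ===== CLAIM (what is proved, stated in full; the proofs are below) =====
def Claim_equal_lex_number : Prop := ∀ (inputstr : String), Dom_lex_number inputstr → Spec_lex_number inputstr (lex_number inputstr)

-- ===== LEMMAS AND PROOFS =====

def digB (c : Char) : Bool := decide ('0' ≤ c ∧ c ≤ '9')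

theorem mem_jsonNumberChars_iff (c : Char) : (c ∈ jsonNumberChars) ↔ digB c = true := by
  simp [jsonNumberChars, digB, Char.ext_iff, Char.le_def, UInt32.le_iff_toNat_le, UInt32.ext_iff]
  omega

theorem lexNumGo_eq (cs acc : List Char) :
    lexNumGo cs acc = acc ++ cs.takeWhile digB := by
  induction cs generalizing acc with
  | nil => simp [lexNumGo]
  | cons c rest ih =>
    simp only [lexNumGo, List.takeWhile]
    by_cases h : c ∈ jsonNumberChars
    · rw [if_pos h, ih, (mem_jsonNumberChars_iff c).mp h]
      simp
    · rw [if_neg h]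
      have : ¬ digB c = true := fun hd => h ((mem_jsonNumberChars_iff c).mpr hd)
      simp [this]

theorem lexAltBoundary_eq (cs : List Char) :
    lexAltBoundary cs = (cs.takeWhile digB).length := by
  induction cs with
  | nil => simp [lexAltBoundary]
  | cons c rest ih =>
    by_cases h : digB c = true
    · have h' : '0' ≤ c ∧ c ≤ '9' := by simpa [digB] using h
      simp [lexAltBoundary, List.takeWhile, h, h', ih]
    · have h' : ¬ ('0' ≤ c ∧ c ≤ '9') := by simpa [digB] using h
      simp [lexAltBoundary, List.takeWhile, h, h']

-- takeWhile is a prefix: indexing below its length agrees with indexing the whole list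
theorem getElem?_takeWhile (p : Char → Bool) (l : List Char) (i : Nat)
    (h : i < (l.takeWhile p).length) : l[i]? = (l.takeWhile p)[i]? := by
  induction l generalizing i with
  | nil => simp at h
  | cons c rest ih =>
    by_cases hp : p c = true
    · cases i with
      | zero => simp [List.takeWhile, hp]
      | succ j =>
        have hj : j < (rest.takeWhile p).length := by
          simpa [List.takeWhile, hp] using h
        simp [List.takeWhile, hp, ih j hj]
    · simp [List.takeWhile, hp] at h

-- the left Horner fold equals the explicit positional sum
theorem horner_eq_sum (ds : List Char) :
    pyIntOfDigits ds =
      ((List.range ds.length).map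
        (fun i => (((ds[i]?.getD ' ').toNat : Int) - 48) * 10 ^ (ds.length - 1 - i))).sum := by
  induction ds using List.reverseRecOn with
  | nil => simp [pyIntOfDigits]
  | append_singleton ds c ih =>
    have hfold : pyIntOfDigits (ds ++ [c])
        = 10 * pyIntOfDigits ds + ((c.toNat : Int) - 48) := by
      simp [pyIntOfDigits]
    rw [hfold, ih]
    rw [List.length_append, List.length_cons, List.length_nil]
    rw [List.range_succ, List.map_append, List.sum_append]
    have hlast : (ds ++ [c])[ds.length]? = some c := by
      simp
    simp only [List.map_cons, List.map_nil, List.sum_cons, List.sum_nil, hlast]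
    have hmap : (List.range ds.length).map
          (fun i => ((((ds ++ [c])[i]?.getD ' ').toNat : Int) - 48) * 10 ^ (ds.length + 1 - 1 - i))
        = (List.range ds.length).map
          (fun i => 10 * (((((ds)[i]?.getD ' ').toNat : Int) - 48) * 10 ^ (ds.length - 1 - i))) := by
      apply List.map_congr_left
      intro i hi
      have hi' : i < ds.length := List.mem_range.mp hi
      have hidx : (ds ++ [c])[i]? = ds[i]? := List.getElem?_append_left hi'
      have hpow : ds.length + 1 - 1 - i = (ds.length - 1 - i) + 1 := by omega
      rw [hidx, hpow]
      ring
    rw [hmap, List.sum_map_mul_left]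
    have he : ds.length + 1 - 1 - ds.length = 0 := by omega
    rw [he, pow_zero, Option.getD_some]
    ring

theorem lex_number_spec_aux (inputstr : String) :
    lex_number inputstr = lex_number_alt inputstr := by
  unfold lex_number lex_number_alt
  simp only [lexNumGo_eq, lexAltBoundary_eq, List.nil_append]
  set tw := inputstr.toList.takeWhile digB with htw
  by_cases hemp : tw.length = 0
  · simp [hemp]
  · rw [if_neg hemp, if_neg hemp]
    have hdot : ¬ ('.' ∈ tw) := by
      intro h
      have := List.mem_takeWhile_imp h
      simp [digB, Char.le_def] at this
    rw [if_neg hdot]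
    refine Prod.ext ?_ rfl
    simp only
    congr 1
    rw [horner_eq_sum]
    congr 1
    apply List.map_congr_left
    intro i hi
    have hi' : i < tw.length := List.mem_range.mp hi
    rw [htw, ← getElem?_takeWhile digB inputstr.toList i (htw ▸ hi')]

-- ===== VERDICT (by name: the statement is the Claim_ definition above) =====
theorem lex_number_spec : Claim_equal_lex_number := by
  intro s _
  exact lex_number_spec_aux s
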